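-- pv_equiv track=rewrite | github.com/UAmsterdam/IR | replication/evaluation.py | labels_to_spans
-- ===== SOURCE A (Python) =====
-- def labels_to_spans(labels):
--     """Convert a list of labels to spans (start, end) indicating label sequences."""
--     """
--     Converts a list of labels ('1' or 'B') into spans.
--
--     Args:
--     - labels: List of labels ('1' or 'B') for tokens.
--
--     Returns:
--     - A list of spans represented as tuples (start, end).
--     """
--     start = None
--     spans = []
--     for pos, label in enumerate(labels):
--         if label == "1" and start is None:
--             start = pos
--         elif label != "1" and start is not None:
--             spans.append((start, pos - 1))
--             start = None
--     if start is not None: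
--         spans.append((start, len(labels) - 1))
--     return spans
-- ===== SOURCE B (Python) =====
-- def labels_to_spans(labels):
--     """Convert a list of labels to spans (start, end) indicating label sequences."""
--     ones = [i for i, l in enumerate(labels) if l == "1"]
--     spans = []
--     while ones:
--         start = end = ones[0]
--         ones = ones[1:]
--         while ones and ones[0] == end + 1:
--             end = ones[0]
--             ones = ones[1:]
--         spans.append((start, end))
--     return spans
-- ===== Notes on version B (the rewrite author's own statement) =====
-- stated objective: alternative
-- what changed: Replaces the single-pass optional-start state machine with a two-pass decomposition: first build the list of positions labelled '1', then segment that index list into maximal consecutive runs, emitting each run as an inclusive (start, end) span.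
import Mathlib
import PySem

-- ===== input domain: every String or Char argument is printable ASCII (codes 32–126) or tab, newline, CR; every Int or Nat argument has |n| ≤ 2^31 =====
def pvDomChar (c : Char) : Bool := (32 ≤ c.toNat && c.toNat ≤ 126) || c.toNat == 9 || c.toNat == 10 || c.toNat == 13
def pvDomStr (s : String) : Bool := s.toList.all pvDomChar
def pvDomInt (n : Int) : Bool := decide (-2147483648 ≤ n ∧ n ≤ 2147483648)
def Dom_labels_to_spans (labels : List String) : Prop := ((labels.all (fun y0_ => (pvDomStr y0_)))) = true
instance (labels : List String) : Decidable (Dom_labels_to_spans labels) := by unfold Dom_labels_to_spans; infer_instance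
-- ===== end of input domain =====

-- B replaces A's single-pass optional-start state machine by a two-pass decomposition:
-- collect the positions labelled "1", then segment that index list into maximal
-- consecutive runs (alternative algorithm of the same cost; return values proved equal).


-- ===== PORT A =====
-- loop body of A: state is (start : Option Int, spans), pl is (pos, label)
def pvStepA (st : Option Int × List (Int × Int)) (pl : Int × String) : Option Int × List (Int × Int) :=
  match st with
  | (none, spans) => if pl.2 == "1" then (some pl.1, spans) else (none, spans)
  | (some s, spans) => if pl.2 == "1" then (some s, spans) else (none, spans ++ [(s, pl.1 - 1)])

-- A's trailing 'if start is not None: spans.append((start, len(labels) - 1))'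
def pvFlushA (st : Option Int × List (Int × Int)) (n : Int) : List (Int × Int) :=
  match st with
  | (none, spans) => spans
  | (some s, spans) => spans ++ [(s, n - 1)]

def labels_to_spans (labels : List String) : List (Int × Int) :=
  pvFlushA ((PySem.List.enumerate labels).foldl pvStepA (none, [])) (labels.length : Int)

-- ===== PORT B =====
-- inner while loop of Source B: extend the current run end over consecutive indices
def pvExtend (e : Int) : List Int → Int × List Int
  | [] => (e, [])
  | j :: rest => if j = e + 1 then pvExtend j rest else (e, j :: rest)

theorem pvExtend_len (e : Int) (l : List Int) : (pvExtend e l).2.length ≤ l.length := by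
  induction l generalizing e with
  | nil => simp [pvExtend]
  | cons j rest ih =>
    simp only [pvExtend]
    split
    · exact le_trans (ih j) (Nat.le_succ _)
    · simp

-- outer while loop of Source B: emit one span per maximal consecutive run
def pvSeg : List Int → List (Int × Int)
  | [] => []
  | i :: rest =>
      let p := pvExtend i rest
      (i, p.1) :: pvSeg p.2
termination_by l => l.length
decreasing_by
  have := pvExtend_len i rest
  simp only [List.length_cons]
  omega

def labels_to_spans_alt (labels : List String) : List (Int × Int) :=
  pvSeg (((PySem.List.enumerate labels).filter (fun p => p.2 == "1")).map (·.1))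

-- ===== PRECONDITION & SPEC =====
def Spec_labels_to_spans (labels : List String) (out : List (Int × Int)) : Prop := out = labels_to_spans_alt labels
instance (labels : List String) (out : List (Int × Int)) : Decidable (Spec_labels_to_spans labels out) := by unfold Spec_labels_to_spans; infer_instance

-- ===== CLAIM (what is proved, stated in full; the proofs are below) =====
def Claim_equal_labels_to_spans : Prop := ∀ (labels : List String), Dom_labels_to_spans labels → Spec_labels_to_spans labels (labels_to_spans labels)

-- ===== LEMMAS AND PROOFS =====

-- A's loop, rewritten as direct recursion carrying the absolute position and the open-span state
def runA : List String → Int → Option Int → List (Int × Int)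
  | [], _, none => []
  | [], pos, some s => [(s, pos - 1)]
  | l :: ls, pos, none => runA ls (pos + 1) (if l == "1" then some pos else none)
  | l :: ls, pos, some s =>
      if l == "1" then runA ls (pos + 1) (some s)
      else (s, pos - 1) :: runA ls (pos + 1) none

-- the positions ≥ pos at which the label is "1"
def pvOnes (pos : Int) : List String → List Int
  | [] => []
  | l :: ls => if l == "1" then pos :: pvOnes (pos + 1) ls else pvOnes (pos + 1) ls

theorem pvOnes_lb (ls : List String) (pos : Int) : ∀ j ∈ pvOnes pos ls, pos ≤ j := by
  induction ls generalizing pos with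
  | nil => simp [pvOnes]
  | cons l ls ih =>
    intro j hj
    simp only [pvOnes] at hj
    split at hj
    · rcases List.mem_cons.1 hj with h | h
      · omega
      · have := ih (pos + 1) j h; omega
    · have := ih (pos + 1) j hj; omega

theorem ones_eq (ls : List String) (pos : Int) :
    ((PySem.List.enumerate ls pos).filter (fun p => p.2 == "1")).map (·.1) = pvOnes pos ls := by
  induction ls generalizing pos with
  | nil => simp [PySem.List.enumerate_nil, pvOnes]
  | cons l ls ih =>
    by_cases h : l == "1" <;>
      simp [PySem.List.enumerate_cons, pvOnes, h, ih]

-- A's fold with accumulator, flushed, equals spans ++ runA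
theorem foldA (ls : List String) (pos : Int) (start : Option Int) (spans : List (Int × Int)) :
    pvFlushA ((PySem.List.enumerate ls pos).foldl pvStepA (start, spans)) (pos + ls.length)
      = spans ++ runA ls pos start := by
  induction ls generalizing pos start spans with
  | nil =>
    cases start with
    | none => simp [PySem.List.enumerate_nil, runA, pvFlushA]
    | some s => simp [PySem.List.enumerate_nil, runA, pvFlushA]
  | cons l ls ih =>
    simp only [PySem.List.enumerate_cons, List.foldl_cons]
    cases start with
    | none =>
      by_cases h : l == "1"
      · simpa [pvStepA, h, runA, List.length_cons, add_comm, add_left_comm, add_assoc] using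
          ih (pos + 1) (some pos) spans
      · simpa [pvStepA, h, runA, List.length_cons, add_comm, add_left_comm, add_assoc] using
          ih (pos + 1) none spans
    | some s =>
      by_cases h : l == "1"
      · simpa [pvStepA, h, runA, List.length_cons, add_comm, add_left_comm, add_assoc] using
          ih (pos + 1) (some s) spans
      · simpa [pvStepA, h, runA, List.length_cons, add_comm, add_left_comm, add_assoc] using
          ih (pos + 1) none (spans ++ [(s, pos - 1)])

-- the central correspondence: A's state machine matches B's run segmentation
theorem runA_seg (ls : List String) (pos : Int) :
    runA ls pos none = pvSeg (pvOnes pos ls) ∧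
    ∀ s, runA ls pos (some s) =
      (s, (pvExtend (pos - 1) (pvOnes pos ls)).1) :: pvSeg (pvExtend (pos - 1) (pvOnes pos ls)).2 := by
  induction ls generalizing pos with
  | nil =>
    constructor
    · simp [runA, pvOnes, pvSeg]
    · intro s; simp [runA, pvOnes, pvExtend, pvSeg]
  | cons l ls ih =>
    by_cases h : l == "1"
    · constructor
      · show runA (l :: ls) pos none = _
        simp only [runA, h, if_true, pvOnes]
        rw [(ih (pos + 1)).2 pos, pvSeg]
        simp [show pos + 1 - 1 = pos from by omega]
      · intro s
        show runA (l :: ls) pos (some s) = _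
        simp only [runA, h, if_true, pvOnes, pvExtend]
        rw [if_pos (by omega : pos = pos - 1 + 1)]
        have h2 := (ih (pos + 1)).2 s
        rw [show pos + 1 - 1 = pos from by omega] at h2
        exact h2
    · have hne : pvExtend (pos - 1) (pvOnes (pos + 1) ls) = (pos - 1, pvOnes (pos + 1) ls) := by
        cases hOnes : pvOnes (pos + 1) ls with
        | nil => simp [pvExtend]
        | cons j rest =>
          have hj : pos + 1 ≤ j := by
            apply pvOnes_lb ls (pos + 1)
            rw [hOnes]; exact List.mem_cons_self
          simp only [pvExtend]
          rw [if_neg (by omega)]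
      constructor
      · show runA (l :: ls) pos none = _
        simp only [runA, h, if_false, Bool.false_eq_true, pvOnes]
        exact (ih (pos + 1)).1
      · intro s
        show runA (l :: ls) pos (some s) = _
        simp only [runA, h, if_false, Bool.false_eq_true, pvOnes, hne]
        rw [(ih (pos + 1)).1]

-- ===== VERDICT (by name: the statement is the Claim_ definition above) =====
theorem labels_to_spans_spec : Claim_equal_labels_to_spans := by
  intro labels _
  show labels_to_spans labels = labels_to_spans_alt labels
  unfold labels_to_spans labels_to_spans_alt
  have h := foldA labels 0 none []
  simp only [zero_add] at h
  rw [h, List.nil_append, (runA_seg labels 0).1, ones_eq]
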